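-- pv_equiv track=rewrite | github.com/id774/scripts | userlist.py | parse_dscacheutil_output
-- ===== SOURCE A (Python) =====
-- def parse_dscacheutil_output(output):
--     users = []
--     current_user = {}
--     for line in output.splitlines():
--         if not line.strip():
--             if current_user:
--                 users.append(current_user)
--                 current_user = {}
--             continue
--         if ': ' in line:
--             key, value = line.split(': ', 1)
--             current_user[key.strip()] = value.strip()
--     if current_user:
--         users.append(current_user)
--     return users
-- ===== SOURCE B (Python) =====
-- def _pair(line):
--     k, v = line.split(': ', 1)
--     return k.strip(), v.strip()
--
--
-- def parse_dscacheutil_output(output):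
--     # Phase 1: group lines into blocks separated by blank (whitespace-only) lines.
--     blocks, run = [], []
--     for line in output.splitlines():
--         if line.strip():
--             run.append(line)
--         else:
--             blocks.append(run)
--             run = []
--     blocks.append(run)
--     # Phase 2: each block becomes a dict of its "key: value" lines; drop empty records.
--     records = [dict(_pair(l) for l in block if ': ' in l) for block in blocks]
--     return [r for r in records if r]
-- ===== Notes on version B (the rewrite author's own statement) =====
-- stated objective: simpler
-- what changed: Replaces A's one-pass state machine (mutable current_user dict flushed at blank lines and at EOF) with a two-phase decomposition: first group the lines into blank-separated blocks, then map each block to a dict of its colon-separated lines and keep the non-empty records.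
import Mathlib
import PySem

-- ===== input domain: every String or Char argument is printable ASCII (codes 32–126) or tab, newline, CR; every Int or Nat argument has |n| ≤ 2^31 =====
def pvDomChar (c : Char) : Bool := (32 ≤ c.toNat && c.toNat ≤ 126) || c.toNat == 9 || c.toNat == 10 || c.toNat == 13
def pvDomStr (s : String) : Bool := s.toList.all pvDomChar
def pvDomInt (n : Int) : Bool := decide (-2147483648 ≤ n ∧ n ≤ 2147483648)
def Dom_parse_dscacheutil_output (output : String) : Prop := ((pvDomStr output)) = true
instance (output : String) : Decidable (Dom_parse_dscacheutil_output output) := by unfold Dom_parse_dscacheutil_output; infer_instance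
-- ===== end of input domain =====

-- B replaces A's one-pass state machine by a two-phase decomposition (group lines into
-- blank-separated blocks, then turn each block into a record); objective: simpler, not faster.

-- ===== PORT A =====
-- one iteration of A's for-loop over (users, current_user)
def pvStepA (st : List (PySem.Dict String String) × PySem.Dict String String) (line : String) :
    List (PySem.Dict String String) × PySem.Dict String String :=
  if PySem.Str.strip line = "" then
    if st.2.size ≠ 0 then (st.1 ++ [st.2], PySem.Dict.empty) else st
  else if PySem.Str.isIn ": " line then
    match PySem.Str.splitMax? line ": " 1 with
    | some (k :: v :: _) => (st.1, st.2.insert (PySem.Str.strip k) (PySem.Str.strip v))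
    | _ => st            -- unreachable: ': ' in line guarantees two parts
  else st

-- A's code after the loop: flush the last record, return the users (dicts as item lists)
def pvFinishA (st : List (PySem.Dict String String) × PySem.Dict String String) :
    List (List (String × String)) :=
  (if st.2.size ≠ 0 then st.1 ++ [st.2] else st.1).map PySem.Dict.items

def parse_dscacheutil_output (output : String) : List (List (String × String)) :=
  pvFinishA ((PySem.Str.splitlines output).foldl pvStepA ([], PySem.Dict.empty))

-- ===== PORT B =====
-- _pair(line): split "key: value" once and strip both sides
def pvPair (line : String) : String × String :=
  match PySem.Str.splitMax? line ": " 1 with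
  | some (k :: v :: _) => (PySem.Str.strip k, PySem.Str.strip v)
  | _ => (line, "")    -- unreachable: callers guard with ': ' in line

-- phase 1 loop body: extend the current run, or close it at a blank line
def pvStepB (acc : List (List String) × List String) (line : String) :
    List (List String) × List String :=
  if PySem.Str.strip line ≠ "" then (acc.1, acc.2 ++ [line]) else (acc.1 ++ [acc.2], [])

-- phase 2: dict(_pair(l) for l in block if ': ' in l)
def pvRecord (block : List String) : PySem.Dict String String :=
  PySem.Dict.ofList ((block.filter (fun l => PySem.Str.isIn ": " l)).map pvPair)

def parse_dscacheutil_output_alt (output : String) : List (List (String × String)) :=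
  let acc := (PySem.Str.splitlines output).foldl pvStepB ([], [])
  let blocks := acc.1 ++ [acc.2]
  (((blocks.map pvRecord).filter (fun r => r.size != 0)).map PySem.Dict.items)

-- ===== PRECONDITION & SPEC =====
def Spec_parse_dscacheutil_output (output : String) (out : List (List (String × String))) : Prop := out = parse_dscacheutil_output_alt output
instance (output : String) (out : List (List (String × String))) : Decidable (Spec_parse_dscacheutil_output output out) := by unfold Spec_parse_dscacheutil_output; infer_instance

-- ===== CLAIM (what is proved, stated in full; the proofs are below) =====
def Claim_equal_parse_dscacheutil_output : Prop := ∀ (output : String), Dom_parse_dscacheutil_output output → Spec_parse_dscacheutil_output output (parse_dscacheutil_output output)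

-- ===== LEMMAS AND PROOFS =====

-- proof-side spec of phase 1: the blank-separated blocks of `lines`, `run` being the open run
def pvBlocks : List String → List String → List (List String)
  | run, [] => [run]
  | run, l :: ls =>
    if PySem.Str.strip l ≠ "" then pvBlocks (run ++ [l]) ls else run :: pvBlocks [] ls

lemma pvFoldB_blocks (lines : List String) :
    ∀ (blocks : List (List String)) (run : List String),
      (lines.foldl pvStepB (blocks, run)).1 ++ [(lines.foldl pvStepB (blocks, run)).2]
        = blocks ++ pvBlocks run lines := by
  induction lines with
  | nil => intro blocks run; simp [pvBlocks]
  | cons l ls ih =>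
    intro blocks run
    by_cases h : PySem.Str.strip l ≠ ""
    · simp only [List.foldl_cons, pvStepB, if_pos h, pvBlocks, ih]
    · simp only [List.foldl_cons, pvStepB, if_neg h, pvBlocks, ih, List.append_assoc,
        List.singleton_append]

lemma pv_go_zero (sep : List Char) (fuel : Nat) (l cur : List Char) (acc : List (List Char)) :
    (PySem.Chars.splitOnMax.go sep fuel 0 l cur acc).length = acc.length + 1 := by
  cases fuel with
  | zero => simp [PySem.Chars.splitOnMax.go]
  | succ f =>
    cases l with
    | nil => simp [PySem.Chars.splitOnMax.go]
    | cons c rest => simp [PySem.Chars.splitOnMax.go]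

lemma pv_go_one (sep : List Char) (hsep : sep ≠ []) :
    ∀ (fuel : Nat) (l cur : List Char) (acc : List (List Char)), l.length < fuel →
      (PySem.Chars.splitOnMax.go sep fuel 1 l cur acc).length
        = acc.length + (if PySem.Chars.isIn sep l then 2 else 1) := by
  intro fuel
  induction fuel with
  | zero => intro l cur acc h; omega
  | succ f ih =>
    intro l cur acc h
    cases l with
    | nil =>
      have hin : PySem.Chars.isIn sep [] = false := by
        rw [PySem.Chars.isIn_eq_false_iff]
        intro hinf
        exact hsep (List.eq_nil_of_infix_nil hinf)
      simp [PySem.Chars.splitOnMax.go, hin]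
    | cons c rest =>
      by_cases hp : sep.isPrefixOf (c :: rest)
      · have hin : PySem.Chars.isIn sep (c :: rest) = true :=
          (PySem.Chars.isIn_iff_infix sep (c :: rest)).mpr
            (List.isPrefixOf_iff_prefix.mp hp).isInfix
        simp [PySem.Chars.splitOnMax.go, hp, pv_go_zero, hin]
      · have hin : PySem.Chars.isIn sep (c :: rest) = PySem.Chars.isIn sep rest := by
          cases hb : PySem.Chars.isIn sep rest with
          | true =>
            exact (PySem.Chars.isIn_iff_infix sep (c :: rest)).mpr
              (List.infix_cons_iff.mpr (Or.inr ((PySem.Chars.isIn_iff_infix sep rest).mp hb)))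
          | false =>
            rw [PySem.Chars.isIn_eq_false_iff]
            intro hinf
            rcases List.infix_cons_iff.mp hinf with hpre | hinf'
            · exact hp (List.isPrefixOf_iff_prefix.mpr hpre)
            · exact (PySem.Chars.isIn_eq_false_iff sep rest).mp hb hinf'
        have hlen : rest.length < f := by simpa using h
        simp [PySem.Chars.splitOnMax.go, hp, ih rest (c :: cur) acc hlen, hin]

lemma pv_split_two (l : String) (h : PySem.Str.isIn ": " l = true) :
    ∃ k v, PySem.Str.splitMax? l ": " 1 = some [k, v] := by
  have hch : PySem.Chars.isIn ([':', ' '] : List Char) l.toList = true := by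
    simpa [PySem.Str.isIn] using h
  have hlen : (PySem.Chars.splitOnMax l.toList ([':', ' '] : List Char) 1).length = 2 := by
    have h1 := pv_go_one ([':', ' '] : List Char) (by decide) (l.toList.length + 1) l.toList [] []
      (Nat.lt_succ_self _)
    rw [hch, if_pos rfl] at h1
    simpa [PySem.Chars.splitOnMax] using h1
  obtain ⟨a, b, hab⟩ := List.length_eq_two.mp hlen
  refine ⟨String.ofList a, String.ofList b, ?_⟩
  simp [PySem.Str.splitMax?, PySem.Chars.splitMax?, hab]

lemma pvRecord_append_sep (run : List String) (l : String)
    (h : PySem.Str.isIn ": " l = true) :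
    pvRecord (run ++ [l]) = (pvRecord run).insert (pvPair l).1 (pvPair l).2 := by
  have h' : PySem.Chars.isIn ([':', ' '] : List Char) l.toList = true := by
    simpa [PySem.Str.isIn] using h
  simp [pvRecord, List.filter_append, h', PySem.Dict.ofList, PySem.Dict.update,
    List.foldl_append]

lemma pvRecord_append_nosep (run : List String) (l : String)
    (h : PySem.Str.isIn ": " l = false) :
    pvRecord (run ++ [l]) = pvRecord run := by
  have h' : PySem.Chars.isIn ([':', ' '] : List Char) l.toList = false := by
    simpa [PySem.Str.isIn] using h
  simp [pvRecord, List.filter_append, h']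

lemma pv_size_zero_empty (d : PySem.Dict String String) (h : d.size = 0) :
    d = PySem.Dict.empty := by
  apply PySem.Dict.ext
  simpa [PySem.Dict.size, List.length_eq_zero_iff, PySem.Dict.empty] using h

lemma pvFoldA_blocks (lines : List String) :
    ∀ (users : List (PySem.Dict String String)) (run : List String),
      pvFinishA (lines.foldl pvStepA (users, pvRecord run))
        = users.map PySem.Dict.items
          ++ (((pvBlocks run lines).map pvRecord).filter (fun r => r.size != 0)).map
              PySem.Dict.items := by
  induction lines with
  | nil =>
    intro users run
    by_cases h : (pvRecord run).size ≠ 0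
    · simp [pvFinishA, pvBlocks, h, bne_iff_ne]
    · simp [pvFinishA, pvBlocks, h, bne_iff_ne]
  | cons l ls ih =>
    intro users run
    by_cases hb : PySem.Str.strip l = ""
    · -- blank line: close the current record
      by_cases hs : (pvRecord run).size ≠ 0
      · have := ih (users ++ [pvRecord run]) []
        simp only [List.foldl_cons, pvStepA, if_pos hb, if_pos hs]
        rw [show (PySem.Dict.empty : PySem.Dict String String) = pvRecord [] from rfl, this]
        simp [pvBlocks, hb, hs, bne_iff_ne]
      · have hempty : pvRecord run = PySem.Dict.empty :=
          pv_size_zero_empty _ (by omega)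
        have := ih users []
        simp only [List.foldl_cons, pvStepA, if_pos hb, if_neg hs]
        rw [show pvRecord run = pvRecord [] from hempty, this]
        simp only [pvBlocks, if_neg (by simp [hb] : ¬ PySem.Str.strip l ≠ "")]
        simp [hempty]
    · -- non-blank line: it extends the current run
      by_cases hin : PySem.Str.isIn ": " l = true
      · obtain ⟨k, v, hsp⟩ := pv_split_two l hin
        have hinc : PySem.Chars.isIn ([':', ' '] : List Char) l.toList = true := by
          simpa [PySem.Str.isIn] using hin
        have hcur : pvStepA (users, pvRecord run) l = (users, pvRecord (run ++ [l])) := by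
          simp [pvStepA, hb, hinc, hsp, pvRecord_append_sep run l hin, pvPair]
        simp only [List.foldl_cons, hcur, ih users (run ++ [l])]
        simp [pvBlocks, hb]
      · have hin' : PySem.Str.isIn ": " l = false := by simpa using hin
        have hinc : PySem.Chars.isIn ([':', ' '] : List Char) l.toList = false := by
          simpa [PySem.Str.isIn] using hin'
        have hcur : pvStepA (users, pvRecord run) l = (users, pvRecord (run ++ [l])) := by
          simp [pvStepA, hb, hinc, pvRecord_append_nosep run l hin']
        simp only [List.foldl_cons, hcur, ih users (run ++ [l])]
        simp [pvBlocks, hb]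

-- ===== VERDICT (by name: the statement is the Claim_ definition above) =====
theorem parse_dscacheutil_output_spec : Claim_equal_parse_dscacheutil_output := by
  intro output _
  unfold Spec_parse_dscacheutil_output parse_dscacheutil_output
  simp only [parse_dscacheutil_output_alt]
  rw [show (PySem.Dict.empty : PySem.Dict String String) = pvRecord [] from rfl,
    pvFoldA_blocks (PySem.Str.splitlines output) [] [],
    pvFoldB_blocks (PySem.Str.splitlines output) [] []]
  simp
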